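-- pv_equiv track=rewrite | github.com/raeez/chiral-bar-cobar | compute/lib/mock_modular_admissible_engine.py | _eta_product_coeffs
-- ===== SOURCE A (Python) =====
-- from typing import Any, Dict, List, Optional, Sequence, Tuple
--
-- def _eta_product_coeffs(nmax: int) -> List[int]:
--     r"""Coefficients of prod_{n>=1}(1-q^n) up to q^nmax.
--
--     This is the PRODUCT part of eta(tau) = q^{1/24} * prod(1-q^n).
--     Uses Euler's pentagonal theorem: prod(1-q^n) = sum (-1)^k q^{k(3k-1)/2}.
--     """
--     coeffs = [0] * (nmax + 1)
--     coeffs[0] = 1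
--     for k in range(1, nmax + 1):
--         # Pentagonal numbers: k(3k-1)/2 and k(3k+1)/2
--         pent1 = k * (3 * k - 1) // 2
--         pent2 = k * (3 * k + 1) // 2
--         sign = (-1) ** k
--         if pent1 <= nmax:
--             coeffs[pent1] += sign
--         if pent2 <= nmax:
--             coeffs[pent2] += sign
--     return coeffs
-- ===== SOURCE B (Python) =====
-- def _eta_product_coeffs(nmax: int) -> list:
--     """Per-index: coefficient of q^i is nonzero iff 24*i+1 is a perfect (odd)
--     square s*s, with k recovered from s = 6k-1 or 6k+1 and sign (-1)**k.
--     The candidate odd root s only grows with i, so it is carried along."""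
--     coeffs = [0] * (nmax + 1)
--     coeffs[0] = 1
--     s = 1
--     for i in range(1, nmax + 1):
--         t = 24 * i + 1
--         while s * s < t:
--             s += 2
--         if s * s == t:
--             k = (s + 1) // 6 if s % 6 == 5 else (s - 1) // 6
--             coeffs[i] = -1 if k % 2 else 1
--     return coeffs
-- ===== Notes on version B (the rewrite author's own statement) =====
-- stated objective: faster
-- what changed: A enumerates k=1..nmax and scatters signs at the two pentagonal indices k(3k-1)/2 and k(3k+1)/2; B never enumerates pentagonal numbers: it loops over each output index i and decides the coefficient locally by testing whether the discriminant 24*i+1 is a perfect square (an incrementally carried odd-root search) and recovering k and its parity from the root s=6k-1 or 6k+1.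
import Mathlib
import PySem

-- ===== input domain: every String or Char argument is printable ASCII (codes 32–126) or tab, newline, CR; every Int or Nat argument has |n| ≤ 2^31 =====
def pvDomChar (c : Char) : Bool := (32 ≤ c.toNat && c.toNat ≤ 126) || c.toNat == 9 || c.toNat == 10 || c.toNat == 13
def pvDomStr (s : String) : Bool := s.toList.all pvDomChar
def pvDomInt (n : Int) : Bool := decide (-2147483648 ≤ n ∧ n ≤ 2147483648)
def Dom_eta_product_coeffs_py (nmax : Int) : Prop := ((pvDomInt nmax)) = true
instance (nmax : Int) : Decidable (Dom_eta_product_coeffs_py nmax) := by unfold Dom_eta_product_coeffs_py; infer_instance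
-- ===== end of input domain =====

-- B replaces A's scatter of signs at enumerated pentagonal indices by a per-index decision:
-- for each i it tests whether the discriminant 24*i+1 is a perfect square (a carried incremental
-- odd-root search) and recovers k and its parity from the root; constant-factor faster in a timing run.

-- ===== PORT A =====
def eta_product_coeffs_py (nmax : Int) : List Int :=
  let coeffs := List.replicate (nmax + 1).toNat (0 : Int)
  let coeffs := PySem.List.pySetD coeffs 0 1
  (PySem.List.pyRange 1 (nmax + 1) 1).foldl (fun coeffs k =>
    let pent1 := PySem.Int.floordiv (k * (3 * k - 1)) 2
    let pent2 := PySem.Int.floordiv (k * (3 * k + 1)) 2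
    let sign : Int := (-1) ^ k.toNat
    let coeffs := if pent1 ≤ nmax then
        PySem.List.pySetD coeffs pent1 (PySem.List.pyGetD coeffs pent1 0 + sign) else coeffs
    if pent2 ≤ nmax then
        PySem.List.pySetD coeffs pent2 (PySem.List.pyGetD coeffs pent2 0 + sign) else coeffs)
    coeffs

-- ===== PORT B =====
-- the inner 'while s * s < t: s += 2' of Source B; the fuel only bounds the recursion
-- (starting from s = 1 the loop makes at most t steps, so fuel t.toNat is never exhausted)
def sLoop : Nat → Int → Int → Int
  | 0, _, s => s
  | f + 1, t, s => if s * s < t then sLoop f t (s + 2) else s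

-- the body of Source B's 'for i in range(1, nmax+1)' loop; the state is (coeffs, s)
def etaStepB (st : List Int × Int) (i : Int) : List Int × Int :=
  let t : Int := 24 * i + 1
  let s : Int := sLoop t.toNat t st.2
  if s * s = t then
    let k : Int := if PySem.Int.mod s 6 = 5 then PySem.Int.floordiv (s + 1) 6
                   else PySem.Int.floordiv (s - 1) 6
    (PySem.List.pySetD st.1 i (if PySem.Int.mod k 2 ≠ 0 then -1 else 1), s)
  else (st.1, s)

def eta_product_coeffs_py_alt (nmax : Int) : List Int :=
  let coeffs := PySem.List.pySetD (List.replicate (nmax + 1).toNat (0 : Int)) 0 1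
  ((PySem.List.pyRange 1 (nmax + 1) 1).foldl etaStepB (coeffs, 1)).1

-- ===== PRECONDITION & SPEC =====
-- Pre_ excludes exactly the negative nmax, on which A raises IndexError (the initial assignment
-- of the constant coefficient hits an empty list); B raises there too.
def Pre_eta_product_coeffs_py (nmax : Int) : Prop := 0 ≤ nmax
instance (nmax : Int) : Decidable (Pre_eta_product_coeffs_py nmax) := by unfold Pre_eta_product_coeffs_py; infer_instance
def pvWitness_eta_product_coeffs_py : Int := 6

def Spec_eta_product_coeffs_py (nmax : Int) (out : List Int) : Prop := out = eta_product_coeffs_py_alt nmax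
instance (nmax : Int) (out : List Int) : Decidable (Spec_eta_product_coeffs_py nmax out) := by unfold Spec_eta_product_coeffs_py; infer_instance

-- ===== CLAIM (what is proved, stated in full; the proofs are below) =====
def Claim_equal_eta_product_coeffs_py : Prop := ∀ (nmax : Int), Dom_eta_product_coeffs_py nmax → Pre_eta_product_coeffs_py nmax → Spec_eta_product_coeffs_py nmax (eta_product_coeffs_py nmax)

-- ===== LEMMAS AND PROOFS =====

-- Nat-side pentagonal numbers and the coefficient function after processing k = 1..m.
def pv1 (k : ℕ) : ℕ := (3 * k * k - k) / 2
def pv2 (k : ℕ) : ℕ := (3 * k * k + k) / 2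
def hitK (m i : ℕ) : Option ℕ := (List.range' 1 m).find? (fun k => pv1 k == i || pv2 k == i)
def cm (m i : ℕ) : Int := if i = 0 then 1 else match hitK m i with | some k => (-1) ^ k | none => 0

lemma sq_parity (k : ℕ) : (3 * k * k) % 2 = k % 2 := by
  rcases Nat.even_or_odd k with ⟨t, rfl⟩ | ⟨t, rfl⟩
  · have h : 3 * (t + t) * (t + t) = 12 * (t * t) := by ring
    rw [h]; generalize t * t = a; omega
  · have h : 3 * (2 * t + 1) * (2 * t + 1) = 12 * (t * t) + 12 * t + 3 := by ring
    rw [h]; generalize t * t = a; omega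

lemma two_mul_pv1 (k : ℕ) : 2 * pv1 k = 3 * k * k - k := by
  have h := sq_parity k; unfold pv1
  have hk : k ≤ 3 * k * k ∨ k = 0 := by
    rcases Nat.eq_zero_or_pos k with rfl | hk
    · right; rfl
    · left; calc k = 1 * 1 * k := by ring
        _ ≤ 3 * k * k := by apply Nat.mul_le_mul; apply Nat.mul_le_mul <;> omega; omega
  generalize 3 * k * k = s at h hk ⊢; omega

lemma two_mul_pv2 (k : ℕ) : 2 * pv2 k = 3 * k * k + k := by
  have h := sq_parity k; unfold pv2; generalize 3 * k * k = s at h ⊢; omega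

lemma pv1_le_pv2 (k : ℕ) : pv1 k ≤ pv2 k := by
  have h1 := two_mul_pv1 k; have h2 := two_mul_pv2 k; omega

lemma pv1_lt_pv2 (k : ℕ) (hk : 1 ≤ k) : pv1 k < pv2 k := by
  have h1 := two_mul_pv1 k; have h2 := two_mul_pv2 k
  have hk3 : k ≤ 3 * k * k := by
    calc k = 1 * 1 * k := by ring
      _ ≤ 3 * k * k := by apply Nat.mul_le_mul; apply Nat.mul_le_mul <;> omega; omega
  omega

lemma one_le_pv1 (k : ℕ) (hk : 1 ≤ k) : k ≤ pv1 k := by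
  have h1 := two_mul_pv1 k
  have h : 3 * k * k ≥ 3 * k := by
    calc 3 * k = 3 * k * 1 := by ring
      _ ≤ 3 * k * k := Nat.mul_le_mul_left _ hk
  omega

lemma pv1_mono (k k' : ℕ) (h : k ≤ k') : pv1 k ≤ pv1 k' := by
  have h1 := two_mul_pv1 k; have h2 := two_mul_pv1 k'
  have hm : 3 * k * k + k' ≤ 3 * k' * k' + k := by
    rcases Nat.eq_zero_or_pos k' with rfl | hk'
    · have : k = 0 := by omega
      subst this; simp
    · have hkk : (k:ℤ) ≤ (k':ℤ) := by exact_mod_cast h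
      have hk1 : (1:ℤ) ≤ (k':ℤ) := by exact_mod_cast hk'
      have hf : (0:ℤ) ≤ ((k':ℤ) - k) * (3 * k' + 3 * k - 1) :=
        mul_nonneg (by linarith) (by linarith)
      zify; nlinarith [hf]
  omega

lemma pv2_lt_pv1_succ (k k' : ℕ) (hk : 1 ≤ k) (h : k < k') : pv2 k < pv1 k' := by
  have h1 := two_mul_pv2 k
  have h2 := two_mul_pv1 (k + 1)
  have h3 : pv1 (k + 1) ≤ pv1 k' := pv1_mono _ _ h
  have he : 3 * (k + 1) * (k + 1) = 3 * k * k + 6 * k + 3 := by ring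
  rw [he] at h2
  generalize 3 * k * k = s at h1 h2; omega

-- cm facts
lemma cm_zero_left (i : ℕ) : cm 0 i = if i = 0 then 1 else 0 := by
  unfold cm hitK; simp

lemma cm_unchanged (m i : ℕ) (h1 : pv1 (m + 1) ≠ i) (h2 : pv2 (m + 1) ≠ i) :
    cm (m + 1) i = cm m i := by
  unfold cm hitK
  rw [List.range'_concat]
  simp only [one_mul, Nat.add_comm 1 m]
  rw [List.find?_append]
  have hnone : List.find? (fun k => pv1 k == i || pv2 k == i) [m + 1] = none := by
    simp [h1, h2]
  rw [hnone, Option.or_none]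

lemma cm_none (m i : ℕ) (hi : i ≠ 0) (h : ∀ k, 1 ≤ k → k ≤ m → pv1 k ≠ i ∧ pv2 k ≠ i) :
    cm m i = 0 := by
  unfold cm hitK
  rw [List.find?_eq_none.mpr]
  · simp [hi]
  · intro k hk
    have hmem : 1 ≤ k ∧ k ≤ m := by
      have := List.mem_range'_1.mp hk; omega
    have := h k hmem.1 hmem.2
    simp [this.1, this.2]

lemma cm_big (m i : ℕ) (hi : pv1 (m + 1) ≤ i) : cm m i = 0 := by
  have hpos : m + 1 ≤ pv1 (m + 1) := one_le_pv1 (m + 1) (by omega)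
  apply cm_none _ _ (by omega)
  intro k hk1 hkm
  have := pv2_lt_pv1_succ k (m + 1) hk1 (by omega)
  have := pv1_le_pv2 k
  omega

lemma cm_hit1 (m : ℕ) : cm (m + 1) (pv1 (m + 1)) = (-1) ^ (m + 1) := by
  have hpos : m + 1 ≤ pv1 (m + 1) := one_le_pv1 (m + 1) (by omega)
  have hle := pv1_le_pv2 (m + 1)
  unfold cm hitK
  rw [List.range'_concat]
  simp only [one_mul, Nat.add_comm 1 m]
  rw [List.find?_append]
  have hleft : List.find? (fun k => pv1 k == pv1 (m + 1) || pv2 k == pv1 (m + 1)) (List.range' 1 m) = none := by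
    rw [List.find?_eq_none]
    intro k hk
    have hmem : 1 ≤ k ∧ k ≤ m := by have := List.mem_range'_1.mp hk; omega
    have h2 := pv2_lt_pv1_succ k (m + 1) hmem.1 (by omega)
    have h1 := pv1_le_pv2 k
    simp only [Bool.or_eq_true, beq_iff_eq, not_or]
    omega
  have hfind : List.find? (fun k => pv1 k == pv1 (m + 1) || pv2 k == pv1 (m + 1)) [m + 1] = some (m + 1) := by
    rw [List.find?_cons]
    have hp : (pv1 (m + 1) == pv1 (m + 1) || pv2 (m + 1) == pv1 (m + 1)) = true := by simp
    rw [hp]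
  rw [hleft, hfind, Option.none_or, if_neg (by omega)]

lemma cm_hit2 (m : ℕ) : cm (m + 1) (pv2 (m + 1)) = (-1) ^ (m + 1) := by
  have hpos : m + 1 ≤ pv1 (m + 1) := one_le_pv1 (m + 1) (by omega)
  have hle := pv1_le_pv2 (m + 1)
  unfold cm hitK
  rw [List.range'_concat]
  simp only [one_mul, Nat.add_comm 1 m]
  rw [List.find?_append]
  have hleft : List.find? (fun k => pv1 k == pv2 (m + 1) || pv2 k == pv2 (m + 1)) (List.range' 1 m) = none := by
    rw [List.find?_eq_none]
    intro k hk
    have hmem : 1 ≤ k ∧ k ≤ m := by have := List.mem_range'_1.mp hk; omega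
    have h2 := pv2_lt_pv1_succ k (m + 1) hmem.1 (by omega)
    have h1 := pv1_le_pv2 k
    simp only [Bool.or_eq_true, beq_iff_eq, not_or]
    omega
  have hfind : List.find? (fun k => pv1 k == pv2 (m + 1) || pv2 k == pv2 (m + 1)) [m + 1] = some (m + 1) := by
    rw [List.find?_cons]
    have hp : (pv1 (m + 1) == pv2 (m + 1) || pv2 (m + 1) == pv2 (m + 1)) = true := by simp
    rw [hp]
  rw [hleft, hfind, Option.none_or, if_neg (by omega)]

-- the unique hit: if k is a (1-based) pentagonal index of j then cm N j = (-1)^k for any N ≥ k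
lemma cm_hit_any (k N j : ℕ) (hk : 1 ≤ k) (hkN : k ≤ N) (hhit : pv1 k = j ∨ pv2 k = j) :
    cm N j = (-1) ^ k := by
  have hj1 : pv1 k ≤ j := by rcases hhit with h | h <;> [omega; (have := pv1_le_pv2 k; omega)]
  have hjpos : 1 ≤ j := le_trans (le_trans hk (one_le_pv1 k hk)) hj1
  have hsplit := List.range'_append (s := 1) (m := k - 1) (n := N - (k - 1)) (step := 1)
  simp only [one_mul] at hsplit
  have hleft : List.find? (fun k' => pv1 k' == j || pv2 k' == j) (List.range' 1 (k - 1)) = none := by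
    rw [List.find?_eq_none]
    intro k' hk'
    have hmem : 1 ≤ k' ∧ k' ≤ k - 1 := by have := List.mem_range'_1.mp hk'; omega
    have h2 := pv2_lt_pv1_succ k' k hmem.1 (by omega)
    have h1 := pv1_le_pv2 k'
    simp only [Bool.or_eq_true, beq_iff_eq, not_or]
    omega
  have hfind : hitK N j = some k := by
    unfold hitK
    rw [show N = (k - 1) + (N - (k - 1)) from by omega, ← hsplit, List.find?_append, hleft,
      Option.none_or, show 1 + (k - 1) = k from by omega,
      show N - (k - 1) = (N - k) + 1 from by omega, List.range'_succ, List.find?_cons]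
    have hp : (pv1 k == j || pv2 k == j) = true := by
      rcases hhit with h | h <;> simp [h]
    rw [hp]
  unfold cm
  rw [hfind, if_neg (by omega)]

-- list-of-map helpers
lemma mapRange_set (f : ℕ → Int) (n j : ℕ) (_hj : j < n) (v : Int) :
    ((List.range n).map f).set j v = (List.range n).map (fun i => if i = j then v else f i) := by
  apply List.ext_getElem
  · simp
  · intro i h1 h2
    simp only [List.getElem_set, List.getElem_map, List.getElem_range]
    by_cases h : j = i
    · subst h; simp
    · have h' : ¬ (i = j) := fun hh => h hh.symm
      simp [h, h']

lemma mapRange_getD (f : ℕ → Int) (n j : ℕ) (hj : j < n) :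
    ((List.range n).map f).getD j 0 = f j := by
  rw [List.getD_eq_getElem _ _ (by simp [hj])]
  simp

-- sign
lemma neg_one_pow_eq (m : ℕ) : ((-1 : Int)) ^ m = if m % 2 = 1 then -1 else 1 := by
  rcases Nat.even_or_odd m with he | ho
  · rw [Even.neg_one_pow he]; have := Nat.even_iff.mp he; simp [this]
  · rw [Odd.neg_one_pow ho]; have := Nat.odd_iff.mp ho; simp [this]

lemma sign_cast (k : ℕ) :
    (if PySem.Int.mod ((k : ℕ) : Int) 2 ≠ 0 then (-1 : Int) else 1) = (-1) ^ k := by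
  have hmod : PySem.Int.mod ((k : ℕ) : Int) 2 = ((k % 2 : ℕ) : Int) := by
    exact_mod_cast PySem.Int.mod_natCast k 2
  rw [hmod, neg_one_pow_eq]
  by_cases h : k % 2 = 1
  · rw [h, if_pos rfl]; norm_num
  · have h0 : k % 2 = 0 := by omega
    rw [h0, if_neg (by norm_num)]; norm_num

-- casts of the pentagonal expressions used by port A
lemma pent1_cast (m : ℕ) : PySem.Int.floordiv ((↑(m + 1) : Int) * (3 * ↑(m + 1) - 1)) 2 = (pv1 (m + 1) : Int) := by
  have hb : m + 1 ≤ 3 * (m + 1) * (m + 1) := by nlinarith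
  have h : ((m + 1 : ℕ) : Int) * (3 * ((m + 1 : ℕ) : Int) - 1) = ((3 * (m + 1) * (m + 1) - (m + 1) : ℕ) : Int) := by
    push_cast [hb]; ring
  rw [h]
  have := PySem.Int.floordiv_natCast (3 * (m + 1) * (m + 1) - (m + 1)) 2
  rw [show ((2:ℕ):Int) = (2:Int) by norm_num] at this
  rw [this]
  unfold pv1; norm_num

lemma pent2_cast (m : ℕ) : PySem.Int.floordiv ((↑(m + 1) : Int) * (3 * ↑(m + 1) + 1)) 2 = (pv2 (m + 1) : Int) := by
  have h : ((m + 1 : ℕ) : Int) * (3 * ((m + 1 : ℕ) : Int) + 1) = ((3 * (m + 1) * (m + 1) + (m + 1) : ℕ) : Int) := by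
    push_cast; ring
  rw [h]
  have := PySem.Int.floordiv_natCast (3 * (m + 1) * (m + 1) + (m + 1)) 2
  rw [show ((2:ℕ):Int) = (2:Int) by norm_num] at this
  rw [this]
  unfold pv2; norm_num

-- ===== A-side characterization =====

def updA (nmax : Int) (coeffs : List Int) (p s : Int) : List Int :=
  if p ≤ nmax then PySem.List.pySetD coeffs p (PySem.List.pyGetD coeffs p 0 + s) else coeffs

def stepA (nmax : Int) (coeffs : List Int) (k : Int) : List Int :=
  updA nmax (updA nmax coeffs (PySem.Int.floordiv (k * (3 * k - 1)) 2) ((-1) ^ k.toNat))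
    (PySem.Int.floordiv (k * (3 * k + 1)) 2) ((-1) ^ k.toNat)

lemma updA_le (N : ℕ) (f : ℕ → Int) (p : ℕ) (s : Int) (hp : p ≤ N) :
    updA (N : Int) ((List.range (N + 1)).map f) (p : Int) s =
      (List.range (N + 1)).map (fun i => if i = p then f p + s else f i) := by
  unfold updA
  rw [if_pos (show (p : Int) ≤ (N : Int) by exact_mod_cast hp)]
  rw [PySem.List.pyGetD_natCast, PySem.List.pySetD_natCast,
    mapRange_getD _ _ _ (by omega), mapRange_set _ _ _ (by omega)]

lemma updA_gt (N : ℕ) (l : List Int) (p : ℕ) (s : Int) (hp : N < p) :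
    updA (N : Int) l (p : Int) s = l := by
  unfold updA
  rw [if_neg (show ¬ ((p : Int) ≤ (N : Int)) by exact_mod_cast Nat.not_le.mpr hp)]

lemma stepA_eq (N m : ℕ) :
    stepA (N : Int) ((List.range (N + 1)).map (cm m)) ((m : Int) + 1) =
      (List.range (N + 1)).map (cm (m + 1)) := by
  have hc : ((m : Int) + 1) = ((m + 1 : ℕ) : Int) := by push_cast; ring
  have hlt12 : pv1 (m + 1) < pv2 (m + 1) := pv1_lt_pv2 (m + 1) (by omega)
  unfold stepA
  rw [hc, pent1_cast, pent2_cast, Int.toNat_natCast]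
  by_cases hp1 : pv1 (m + 1) ≤ N
  · rw [updA_le _ _ _ _ hp1, cm_big m _ (le_refl _)]
    by_cases hp2 : pv2 (m + 1) ≤ N
    · rw [updA_le _ _ _ _ hp2]
      rw [if_neg (by omega), cm_big m _ (le_of_lt hlt12)]
      apply List.map_congr_left
      intro i hi
      have hiN : i ≤ N := by have := List.mem_range.mp hi; omega
      by_cases h2 : i = pv2 (m + 1)
      · subst h2; rw [if_pos rfl, cm_hit2]; ring
      · rw [if_neg h2]
        by_cases h1 : i = pv1 (m + 1)
        · subst h1; rw [if_pos rfl, cm_hit1]; ring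
        · rw [if_neg h1, cm_unchanged m i (fun hh => h1 hh.symm) (fun hh => h2 hh.symm)]
    · rw [updA_gt _ _ _ _ (by omega)]
      apply List.map_congr_left
      intro i hi
      have hiN : i ≤ N := by have := List.mem_range.mp hi; omega
      by_cases h1 : i = pv1 (m + 1)
      · subst h1; rw [if_pos rfl, cm_hit1]; ring
      · rw [if_neg h1, cm_unchanged m i (fun hh => h1 hh.symm) (fun hh => by omega)]
  · rw [updA_gt _ _ _ _ (by omega), updA_gt _ _ _ _ (by omega)]
    apply List.map_congr_left
    intro i hi
    have hiN : i ≤ N := by have := List.mem_range.mp hi; omega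
    rw [cm_unchanged m i (by omega) (by omega)]

lemma foldA (N : ℕ) (m : ℕ) (hm : m ≤ N) :
    (PySem.List.pyRange 1 ((m : Int) + 1) 1).foldl (stepA (N : Int)) ((List.range (N + 1)).map (cm 0)) =
      (List.range (N + 1)).map (cm m) := by
  induction m with
  | zero => simp
  | succ m ih =>
    have hsplit : PySem.List.pyRange 1 ((↑(m + 1) : Int) + 1) 1 =
        PySem.List.pyRange 1 ((m : Int) + 1) 1 ++ [(m : Int) + 1] := by
      have := PySem.List.pyRange_one_succ_right (a := 1) (b := (m : Int) + 1) (by omega)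
      rw [show ((↑(m + 1) : Int) + 1) = ((m : Int) + 1 + 1) from by push_cast; ring]
      exact this
    rw [show ((↑(m + 1) : ℕ) : Int) = ((m : Int) + 1) from by push_cast; ring] at *
    rw [hsplit, List.foldl_append, ih (by omega), List.foldl_cons, List.foldl_nil, stepA_eq]

lemma initA (N : ℕ) :
    PySem.List.pySetD (List.replicate (N + 1) (0 : Int)) 0 1 = (List.range (N + 1)).map (cm 0) := by
  rw [show (0 : Int) = ((0 : ℕ) : Int) from rfl, PySem.List.pySetD_natCast]
  apply List.ext_getElem
  · simp
  · intro i h1 h2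
    simp only [List.getElem_set, List.getElem_map, List.getElem_range, List.getElem_replicate]
    rw [cm_zero_left]
    by_cases h : i = 0
    · simp [h]
    · simp [h]
      omega

lemma A_char (N : ℕ) : eta_product_coeffs_py (N : Int) = (List.range (N + 1)).map (cm N) := by
  have hfun : (fun (coeffs : List Int) (k : Int) =>
      let pent1 := PySem.Int.floordiv (k * (3 * k - 1)) 2
      let pent2 := PySem.Int.floordiv (k * (3 * k + 1)) 2
      let sign : Int := (-1) ^ k.toNat
      let coeffs := if pent1 ≤ (N : Int) then
          PySem.List.pySetD coeffs pent1 (PySem.List.pyGetD coeffs pent1 0 + sign) else coeffs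
      if pent2 ≤ (N : Int) then
          PySem.List.pySetD coeffs pent2 (PySem.List.pyGetD coeffs pent2 0 + sign) else coeffs) =
      stepA (N : Int) := by
    funext c k; rfl
  show (PySem.List.pyRange 1 ((N : Int) + 1) 1).foldl _
      (PySem.List.pySetD (List.replicate ((N : Int) + 1).toNat (0 : Int)) 0 1) = _
  rw [hfun, show ((N : Int) + 1).toNat = N + 1 from by omega, initA]
  exact foldA N N (le_refl N)

-- ===== B-side characterization =====

-- the inner while loop: result is an odd value ≥ 1 with square ≥ t, minimal among odd values
lemma sLoop_inv : ∀ (f : ℕ) (t s : Int), t ≤ (s + 2 * (f : Int)) * (s + 2 * (f : Int)) → 0 ≤ s →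
    ∃ j : ℕ, sLoop f t s = s + 2 * (j : Int) ∧ t ≤ (s + 2 * j) * (s + 2 * j) ∧
      (j = 0 ∨ (s + 2 * j - 2) * (s + 2 * j - 2) < t) := by
  intro f
  induction f with
  | zero =>
    intro t s h hs
    exact ⟨0, by simp [sLoop], by simpa using h, Or.inl rfl⟩
  | succ f ih =>
    intro t s h hs
    by_cases hlt : s * s < t
    · have h' : t ≤ (s + 2 + 2 * (f : Int)) * (s + 2 + 2 * (f : Int)) := by
        have e : s + 2 + 2 * (f : Int) = s + 2 * (((f + 1 : ℕ)) : Int) := by push_cast; ring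
        rw [e]; exact h
      obtain ⟨j, hj1, hj2, hj3⟩ := ih t (s + 2) h' (by omega)
      refine ⟨j + 1, ?_, ?_, ?_⟩
      · simp only [sLoop, if_pos hlt]
        rw [hj1]; push_cast; ring
      · have : s + 2 * ((j : Int) + 1) = s + 2 + 2 * j := by ring
        rw [show ((j + 1 : ℕ) : Int) = (j : Int) + 1 from by push_cast; ring, this]; exact hj2
      · right
        rcases hj3 with rfl | hj3
        · simp only [Nat.cast_zero, mul_zero, add_zero] at *
          have : s + 2 * ((0 + 1 : ℕ) : Int) - 2 = s := by push_cast; ring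
          rw [this]; exact hlt
        · have : s + 2 * ((j + 1 : ℕ) : Int) - 2 = s + 2 + 2 * (j : Int) - 2 := by push_cast; ring
          rw [this]; exact hj3
    · exact ⟨0, by simp [sLoop, hlt], by simpa using not_lt.mp hlt, Or.inl rfl⟩

-- characterization of the loop's result: the minimal odd s with s*s ≥ t
def GoodS (t s : Int) : Prop :=
  (∃ v : ℕ, s = 1 + 2 * (v : Int)) ∧ t ≤ s * s ∧ (s = 1 ∨ (s - 2) * (s - 2) < t)

lemma sLoop_good (t s0 : Int) (ht : 1 ≤ t) (hodd : ∃ v : ℕ, s0 = 1 + 2 * (v : Int))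
    (hstart : s0 = 1 ∨ (s0 - 2) * (s0 - 2) < t) : GoodS t (sLoop t.toNat t s0) := by
  obtain ⟨v, rfl⟩ := hodd
  have hv0 : (0 : Int) ≤ (v : Int) := Int.natCast_nonneg v
  have hf : t ≤ (1 + 2 * (v : Int) + 2 * (t.toNat : Int)) * (1 + 2 * (v : Int) + 2 * (t.toNat : Int)) := by
    have h1 : t = (t.toNat : Int) := by omega
    nlinarith [h1 ▸ ht, Int.toNat_of_nonneg (by omega : (0:Int) ≤ t)]
  obtain ⟨j, h1, h2, h3⟩ := sLoop_inv t.toNat t (1 + 2 * (v : Int)) hf (by omega)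
  refine ⟨⟨v + j, by rw [h1]; push_cast; ring⟩, by rw [h1]; exact h2, ?_⟩
  rcases h3 with hj0 | h3
  · have hz : sLoop t.toNat t (1 + 2 * (v : Int)) = 1 + 2 * (v : Int) := by
      rw [h1, hj0]; simp
    rw [hz]; exact hstart
  · right; rw [h1]; exact h3

lemma good_unique (t r r' : Int) (h : GoodS t r) (h' : GoodS t r') : r = r' := by
  obtain ⟨⟨u, rfl⟩, hge, hmin⟩ := h
  obtain ⟨⟨v, rfl⟩, hge', hmin'⟩ := h'
  rcases lt_trichotomy u v with hlt | heq | hgt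
  · exfalso
    have huv : (u : Int) < (v : Int) := by exact_mod_cast hlt
    have hu0 : (0 : Int) ≤ (u : Int) := Int.natCast_nonneg u
    rcases hmin' with h1 | h1
    · omega
    · have he : (1 : Int) + 2 * (v : Int) - 2 = 2 * (v : Int) - 1 := by ring
      rw [he] at h1
      have hle : (1 : Int) + 2 * (u : Int) ≤ 2 * (v : Int) - 1 := by omega
      have hsq2 : ((1 : Int) + 2 * u) * ((1 : Int) + 2 * u) ≤
          (2 * (v : Int) - 1) * (2 * (v : Int) - 1) := mul_self_le_mul_self (by omega) hle
      linarith
  · rw [heq]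
  · exfalso
    have hvu : (v : Int) < (u : Int) := by exact_mod_cast hgt
    have hv0 : (0 : Int) ≤ (v : Int) := Int.natCast_nonneg v
    rcases hmin with h1 | h1
    · omega
    · have he : (1 : Int) + 2 * (u : Int) - 2 = 2 * (u : Int) - 1 := by ring
      rw [he] at h1
      have hle : (1 : Int) + 2 * (v : Int) ≤ 2 * (u : Int) - 1 := by omega
      have hsq2 : ((1 : Int) + 2 * v) * ((1 : Int) + 2 * v) ≤
          (2 * (u : Int) - 1) * (2 * (u : Int) - 1) := mul_self_le_mul_self (by omega) hle
      linarith

lemma sLoop_one (t : Int) (ht : 1 ≤ t) : GoodS t (sLoop t.toNat t 1) :=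
  sLoop_good t 1 ht ⟨0, by norm_num⟩ (Or.inl rfl)

-- if t has an odd root m ≥ 1, the while loop (started at 1) stops exactly at m
lemma sLoop_exact (t m : Int) (ht : 1 ≤ t) (hm : 1 ≤ m) (hodd : ∃ u : ℕ, m = 1 + 2 * (u : Int))
    (hsq : m * m = t) : sLoop t.toNat t 1 = m := by
  refine good_unique t _ m (sLoop_one t ht) ⟨hodd, le_of_eq hsq.symm, ?_⟩
  obtain ⟨u, rfl⟩ := hodd
  rcases Nat.eq_zero_or_pos u with rfl | hu
  · left; norm_num
  · right
    have hu1 : (1 : Int) ≤ (u : Int) := by exact_mod_cast hu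
    nlinarith [hsq, hu1]

-- per-index value computed by Source B's loop body
def cB (j : ℕ) : Int :=
  let t : Int := 24 * (j : Int) + 1
  let s : Int := sLoop t.toNat t 1
  if s * s = t then
    (if PySem.Int.mod (if PySem.Int.mod s 6 = 5 then PySem.Int.floordiv (s + 1) 6
        else PySem.Int.floordiv (s - 1) 6) 2 ≠ 0 then -1 else 1)
  else 0

lemma two_mul_pv1_int (k : ℕ) : 2 * ((pv1 k : ℤ)) = 3 * k * k - k := by
  have h := two_mul_pv1 k
  have hk : k ≤ 3 * k * k := by
    rcases Nat.eq_zero_or_pos k with rfl | hp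
    · simp
    · calc k = 1 * 1 * k := by ring
        _ ≤ 3 * k * k := by apply Nat.mul_le_mul; apply Nat.mul_le_mul <;> omega; omega
  zify [hk] at h
  linarith

lemma two_mul_pv2_int (k : ℕ) : 2 * ((pv2 k : ℤ)) = 3 * k * k + k := by
  have h := two_mul_pv2 k
  zify at h
  linarith

-- if j = pv1 k (resp. pv2 k), k ≥ 1, then 24 j + 1 = (6k-1)² (resp. (6k+1)²)
lemma disc_pv1 (k : ℕ) : (6 * (k : ℤ) - 1) * (6 * (k : ℤ) - 1) = 24 * (pv1 k : ℤ) + 1 := by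
  have := two_mul_pv1_int k; nlinarith [this]

lemma disc_pv2 (k : ℕ) : (6 * (k : ℤ) + 1) * (6 * (k : ℤ) + 1) = 24 * (pv2 k : ℤ) + 1 := by
  have := two_mul_pv2_int k; nlinarith [this]

lemma cB_eq_cm (N j : ℕ) (hj1 : 1 ≤ j) (hjN : j ≤ N) : cB j = cm N j := by
  have ht : (1 : Int) ≤ 24 * (j : Int) + 1 := by omega
  obtain ⟨⟨u, hr⟩, hge, hmin⟩ := sLoop_one (24 * (j : Int) + 1) ht
  unfold cB
  simp only []
  by_cases hhit : sLoop (24 * (j : Int) + 1).toNat (24 * (j : Int) + 1) 1 *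
      sLoop (24 * (j : Int) + 1).toNat (24 * (j : Int) + 1) 1 = 24 * (j : Int) + 1
  · rw [if_pos hhit]
    rw [hr] at hhit
    -- the odd root 1+2u : classify (1+2u) % 6
    have hcast : (1 : Int) + 2 * (u : Int) = ((1 + 2 * u : ℕ) : Int) := by push_cast; ring
    have hmod6 : (1 + 2 * u) % 6 = 1 ∨ (1 + 2 * u) % 6 = 3 ∨ (1 + 2 * u) % 6 = 5 := by omega
    rcases hmod6 with h6 | h6 | h6
    · -- s = 6a+1, a ≥ 1 (a = 0 forces j = 0): j = pv2 a
      obtain ⟨a, ha⟩ : ∃ a, 1 + 2 * u = 6 * a + 1 := ⟨(1 + 2 * u) / 6, by omega⟩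
      have haZ : (1 : Int) + 2 * (u : Int) = 6 * (a : Int) + 1 := by exact_mod_cast ha
      have ha1 : 1 ≤ a := by
        by_contra hc
        have hu0 : u = 0 := by omega
        rw [hu0] at hhit
        push_cast at hhit
        omega
      have hj : j = pv2 a := by
        have hd := disc_pv2 a
        have hEq : (6 * (a : ℤ) + 1) * (6 * (a : ℤ) + 1) = 24 * (j : ℤ) + 1 := by
          rw [← haZ]; exact hhit
        have := hEq.symm.trans hd
        have h2 : (j : ℤ) = (pv2 a : ℤ) := by linarith
        exact_mod_cast h2
      have hmods : PySem.Int.mod (1 + 2 * (u : Int)) 6 = ((1 + 2 * u) % 6 : ℕ) := by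
        rw [hcast]; exact_mod_cast PySem.Int.mod_natCast (1 + 2 * u) 6
      have hcond : ¬ PySem.Int.mod (1 + 2 * (u : Int)) 6 = 5 := by
        rw [hmods, h6]; decide
      have hfd : PySem.Int.floordiv (1 + 2 * (u : Int) - 1) 6 = (a : Int) := by
        rw [PySem.Int.floordiv_eq_ediv_of_pos (by norm_num)]; omega
      have hksel : (if PySem.Int.mod (1 + 2 * (u : Int)) 6 = 5 then
          PySem.Int.floordiv (1 + 2 * (u : Int) + 1) 6
          else PySem.Int.floordiv (1 + 2 * (u : Int) - 1) 6) = ((a : ℕ) : Int) := by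
        rw [if_neg hcond, hfd]
      rw [hr, hksel, sign_cast a, hj, cm_hit_any a N (pv2 a) ha1 ?_ (Or.inr rfl)]
      have := one_le_pv1 a ha1
      have := pv1_le_pv2 a
      omega
    · -- s divisible by 3: impossible, 24j+1 ≢ 0 mod 3
      exfalso
      obtain ⟨a, ha⟩ : ∃ a, 1 + 2 * u = 6 * a + 3 := ⟨(1 + 2 * u) / 6, by omega⟩
      have haZ : (1 : Int) + 2 * (u : Int) = 6 * (a : Int) + 3 := by exact_mod_cast ha
      have hZ : (6 * (a : Int) + 3) * (6 * (a : Int) + 3) = 24 * (j : Int) + 1 := by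
        rw [← haZ]; exact hhit
      have hn : (6 * a + 3) * (6 * a + 3) = 24 * j + 1 := by exact_mod_cast hZ
      have hx : (6 * a + 3) * (6 * a + 3) = 36 * (a * a) + 36 * a + 9 := by ring
      omega
    · -- s = 6a+5 = 6(a+1)-1 : j = pv1 (a+1)
      obtain ⟨a, ha⟩ : ∃ a, 1 + 2 * u = 6 * a + 5 := ⟨(1 + 2 * u) / 6, by omega⟩
      have haZ : (1 : Int) + 2 * (u : Int) = 6 * (a : Int) + 5 := by exact_mod_cast ha
      have hj : j = pv1 (a + 1) := by
        have hd := disc_pv1 (a + 1)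
        have hm : (6 : ℤ) * ((a + 1 : ℕ) : ℤ) - 1 = 1 + 2 * (u : Int) := by push_cast; linarith
        have hEq : (6 * ((a + 1 : ℕ) : ℤ) - 1) * (6 * ((a + 1 : ℕ) : ℤ) - 1) = 24 * (j : ℤ) + 1 := by
          rw [hm]; exact hhit
        have := hEq.symm.trans hd
        have h2 : (j : ℤ) = (pv1 (a + 1) : ℤ) := by linarith
        exact_mod_cast h2
      have hmods : PySem.Int.mod (1 + 2 * (u : Int)) 6 = ((1 + 2 * u) % 6 : ℕ) := by
        rw [hcast]; exact_mod_cast PySem.Int.mod_natCast (1 + 2 * u) 6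
      have hcond : PySem.Int.mod (1 + 2 * (u : Int)) 6 = 5 := by
        rw [hmods, h6]; decide
      have hfd : PySem.Int.floordiv (1 + 2 * (u : Int) + 1) 6 = ((a + 1 : ℕ) : Int) := by
        rw [PySem.Int.floordiv_eq_ediv_of_pos (by norm_num)]; push_cast; omega
      have hksel : (if PySem.Int.mod (1 + 2 * (u : Int)) 6 = 5 then
          PySem.Int.floordiv (1 + 2 * (u : Int) + 1) 6
          else PySem.Int.floordiv (1 + 2 * (u : Int) - 1) 6) = ((a + 1 : ℕ) : Int) := by
        rw [if_pos hcond, hfd]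
      rw [hr, hksel, sign_cast (a + 1), hj,
        cm_hit_any (a + 1) N (pv1 (a + 1)) (by omega) ?_ (Or.inl rfl)]
      have := one_le_pv1 (a + 1) (by omega)
      omega
  · -- no odd root: 24j+1 is not a perfect square of the form (6k∓1)², so no pentagonal hit
    rw [if_neg hhit]
    refine (cm_none N j (by omega) ?_).symm
    intro k hk1 _
    constructor
    · intro hp1
      apply hhit
      have hk1Z : (1 : Int) ≤ (k : Int) := by exact_mod_cast hk1
      have hsqeq : (6 * (k : Int) - 1) * (6 * (k : Int) - 1) = 24 * (j : Int) + 1 := by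
        rw [← hp1]; exact_mod_cast disc_pv1 k
      have hroot : sLoop (24 * (j : Int) + 1).toNat (24 * (j : Int) + 1) 1 = 6 * (k : Int) - 1 :=
        sLoop_exact (24 * (j : Int) + 1) (6 * (k : Int) - 1) ht (by omega)
          ⟨3 * k - 1, by omega⟩ hsqeq
      rw [hroot]; exact hsqeq
    · intro hp2
      apply hhit
      have hsqeq : (6 * (k : Int) + 1) * (6 * (k : Int) + 1) = 24 * (j : Int) + 1 := by
        rw [← hp2]; exact_mod_cast disc_pv2 k
      have hroot : sLoop (24 * (j : Int) + 1).toNat (24 * (j : Int) + 1) 1 = 6 * (k : Int) + 1 :=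
        sLoop_exact (24 * (j : Int) + 1) (6 * (k : Int) + 1) ht (by omega)
          ⟨3 * k, by omega⟩ hsqeq
      rw [hroot]; exact hsqeq

-- the fold of etaStepB over 1..m, on the shared initial list
lemma foldB (N m : ℕ) (hm : m ≤ N) :
    (PySem.List.pyRange 1 ((m : Int) + 1) 1).foldl etaStepB ((List.range (N + 1)).map (cm 0), 1) =
      ((List.range (N + 1)).map (fun j => if j ≤ m ∧ 1 ≤ j then cB j else cm 0 j),
        if m = 0 then 1 else
          sLoop (24 * (m : Int) + 1).toNat (24 * (m : Int) + 1) 1) := by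
  induction m with
  | zero =>
    simp only [Nat.cast_zero, zero_add]
    rw [show PySem.List.pyRange 1 1 1 = ([] : List Int) from by decide, List.foldl_nil]
    refine congrArg₂ Prod.mk ?_ (by simp)
    apply List.map_congr_left
    intro i _
    rw [if_neg (by omega)]
  | succ m ih =>
    have hsplit : PySem.List.pyRange 1 ((↑(m + 1) : Int) + 1) 1 =
        PySem.List.pyRange 1 ((m : Int) + 1) 1 ++ [(m : Int) + 1] := by
      have := PySem.List.pyRange_one_succ_right (a := 1) (b := (m : Int) + 1) (by omega)
      rw [show ((↑(m + 1) : Int) + 1) = ((m : Int) + 1 + 1) from by push_cast; ring]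
      exact this
    rw [hsplit, List.foldl_append, ih (by omega), List.foldl_cons, List.foldl_nil]
    rw [show ((m : Int) + 1) = ((m + 1 : ℕ) : Int) from by push_cast; ring]
    have ht1 : (1 : Int) ≤ 24 * ((m + 1 : ℕ) : Int) + 1 := by omega
    -- the carried start value is odd and below-minimal for the new target, so the
    -- restarted-from-1 search would stop at the same root
    have hgood0 : (∃ v : ℕ, (if m = 0 then (1 : Int) else
          sLoop (24 * (m : Int) + 1).toNat (24 * (m : Int) + 1) 1) = 1 + 2 * (v : Int)) ∧
        ((if m = 0 then (1 : Int) else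
          sLoop (24 * (m : Int) + 1).toNat (24 * (m : Int) + 1) 1) = 1 ∨
         ((if m = 0 then (1 : Int) else
          sLoop (24 * (m : Int) + 1).toNat (24 * (m : Int) + 1) 1) - 2) *
         ((if m = 0 then (1 : Int) else
          sLoop (24 * (m : Int) + 1).toNat (24 * (m : Int) + 1) 1) - 2) <
          24 * ((m + 1 : ℕ) : Int) + 1) := by
      by_cases hm0 : m = 0
      · rw [if_pos hm0]
        exact ⟨⟨0, by norm_num⟩, Or.inl rfl⟩
      · rw [if_neg hm0]
        obtain ⟨hodd, hge, hmin⟩ := sLoop_one (24 * (m : Int) + 1) (by omega)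
        refine ⟨hodd, ?_⟩
        rcases hmin with h | h
        · exact Or.inl h
        · right
          have hlt : 24 * (m : Int) + 1 < 24 * ((m + 1 : ℕ) : Int) + 1 := by push_cast; omega
          linarith
    have hS : sLoop (24 * ((m + 1 : ℕ) : Int) + 1).toNat (24 * ((m + 1 : ℕ) : Int) + 1)
          (if m = 0 then (1 : Int) else
            sLoop (24 * (m : Int) + 1).toNat (24 * (m : Int) + 1) 1) =
        sLoop (24 * ((m + 1 : ℕ) : Int) + 1).toNat (24 * ((m + 1 : ℕ) : Int) + 1) 1 :=
      good_unique _ _ _ (sLoop_good _ _ ht1 hgood0.1 hgood0.2) (sLoop_one _ ht1)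
    simp only [etaStepB]
    rw [hS]
    by_cases hhit : sLoop (24 * ((m + 1 : ℕ) : Int) + 1).toNat (24 * ((m + 1 : ℕ) : Int) + 1) 1 *
        sLoop (24 * ((m + 1 : ℕ) : Int) + 1).toNat (24 * ((m + 1 : ℕ) : Int) + 1) 1 =
        24 * ((m + 1 : ℕ) : Int) + 1
    · rw [if_pos hhit]
      refine congrArg₂ Prod.mk ?_ (by rw [if_neg (Nat.succ_ne_zero m)])
      rw [PySem.List.pySetD_natCast, mapRange_set _ _ (m + 1) (by omega)]
      apply List.map_congr_left
      intro i hi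
      by_cases hieq : i = m + 1
      · subst hieq
        rw [if_pos (show m + 1 = m + 1 from rfl),
          if_pos (show m + 1 ≤ m + 1 ∧ 1 ≤ m + 1 from ⟨le_refl _, by omega⟩)]
        have hcb : cB (m + 1) = (if PySem.Int.mod
            (if PySem.Int.mod (sLoop (24 * ((m + 1 : ℕ) : Int) + 1).toNat
                (24 * ((m + 1 : ℕ) : Int) + 1) 1) 6 = 5 then
              PySem.Int.floordiv (sLoop (24 * ((m + 1 : ℕ) : Int) + 1).toNat
                (24 * ((m + 1 : ℕ) : Int) + 1) 1 + 1) 6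
            else PySem.Int.floordiv (sLoop (24 * ((m + 1 : ℕ) : Int) + 1).toNat
                (24 * ((m + 1 : ℕ) : Int) + 1) 1 - 1) 6) 2 ≠ 0 then (-1 : Int) else 1) := by
          simp only [cB]
          rw [if_pos hhit]
        rw [hcb]
      · rw [if_neg hieq]
        by_cases hc : i ≤ m ∧ 1 ≤ i
        · rw [if_pos hc, if_pos (show i ≤ m + 1 ∧ 1 ≤ i from ⟨Nat.le_succ_of_le hc.1, hc.2⟩)]
        · rw [if_neg hc, if_neg (show ¬(i ≤ m + 1 ∧ 1 ≤ i) from fun h => hc ⟨by omega, h.2⟩)]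
    · rw [if_neg hhit]
      refine congrArg₂ Prod.mk ?_ (by rw [if_neg (Nat.succ_ne_zero m)])
      apply List.map_congr_left
      intro i hi
      by_cases hieq : i = m + 1
      · subst hieq
        rw [if_neg (show ¬(m + 1 ≤ m ∧ 1 ≤ m + 1) from fun h => by omega),
          if_pos (show m + 1 ≤ m + 1 ∧ 1 ≤ m + 1 from ⟨le_refl _, by omega⟩)]
        have hcb : cB (m + 1) = 0 := by
          simp only [cB]
          rw [if_neg hhit]
        rw [hcb, cm_zero_left, if_neg (show ¬(m + 1 = 0) from by omega)]
      · by_cases hc : i ≤ m ∧ 1 ≤ i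
        · rw [if_pos hc, if_pos (show i ≤ m + 1 ∧ 1 ≤ i from ⟨Nat.le_succ_of_le hc.1, hc.2⟩)]
        · rw [if_neg hc, if_neg (show ¬(i ≤ m + 1 ∧ 1 ≤ i) from fun h => hc ⟨by omega, h.2⟩)]

lemma B_char (N : ℕ) : eta_product_coeffs_py_alt (N : Int) = (List.range (N + 1)).map (cm N) := by
  show ((PySem.List.pyRange 1 ((N : Int) + 1) 1).foldl etaStepB
      (PySem.List.pySetD (List.replicate ((N : Int) + 1).toNat (0 : Int)) 0 1, 1)).1 = _
  rw [show ((N : Int) + 1).toNat = N + 1 from by omega, initA, foldB N N (le_refl N)]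
  apply List.map_congr_left
  intro i hi
  have hiN : i ≤ N := by have := List.mem_range.mp hi; omega
  by_cases h : 1 ≤ i
  · rw [if_pos ⟨hiN, h⟩, cB_eq_cm N i h hiN]
  · have h0 : i = 0 := by omega
    subst h0
    rw [if_neg (by omega)]
    simp [cm]

-- ===== assembly =====

theorem eta_product_coeffs_py_spec : Claim_equal_eta_product_coeffs_py := by
  intro nmax _ hpre
  unfold Spec_eta_product_coeffs_py
  unfold Pre_eta_product_coeffs_py at hpre
  obtain ⟨N, rfl⟩ : ∃ N : ℕ, nmax = (N : Int) := ⟨nmax.toNat, (Int.toNat_of_nonneg hpre).symm⟩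
  rw [A_char, B_char]
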